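-- pv_equiv track=rewrite | github.com/UX-Decoder/LLaVA-Grounding | scripts/data_process/interleave2end.py | add_numbers_to_substring
-- ===== SOURCE A (Python) =====
-- def add_numbers_to_substring(input_string, substring):
--     count = 1
--     index = 0
--     result = []
--
--     while index < len(input_string):
--         next_index = input_string.find(substring, index)
--         if next_index == -1:
--             break
--
--         result.append(input_string[index:next_index])
--         result.append(f"{substring}{count} ")
--         count += 1
--         index = next_index + len(substring)
--
--     result.append(input_string[index:])
--
--     return ''.join(result)
-- ===== SOURCE B (Python) =====
-- def add_numbers_to_substring(input_string, substring):
--     parts = input_string.split(substring)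
--     pieces = [f"{substring}{i} {part}" for i, part in enumerate(parts[1:], 1)]
--     return parts[0] + ''.join(pieces)
-- ===== Notes on version B (the rewrite author's own statement) =====
-- stated objective: alternative
-- what changed: B segments the whole string once with str.split and interleaves the numbered separators back in a single enumerate pass, instead of A's incremental find/slice/append loop; Pre_ excludes substring == "", where A loops forever on every non-empty input (returning "" only on the single input ("", "")) while B's split raises ValueError.
-- outside the precondition, e.g. on add_numbers_to_substring('', ''): A returns '', B raises ValueError
import Mathlib
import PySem

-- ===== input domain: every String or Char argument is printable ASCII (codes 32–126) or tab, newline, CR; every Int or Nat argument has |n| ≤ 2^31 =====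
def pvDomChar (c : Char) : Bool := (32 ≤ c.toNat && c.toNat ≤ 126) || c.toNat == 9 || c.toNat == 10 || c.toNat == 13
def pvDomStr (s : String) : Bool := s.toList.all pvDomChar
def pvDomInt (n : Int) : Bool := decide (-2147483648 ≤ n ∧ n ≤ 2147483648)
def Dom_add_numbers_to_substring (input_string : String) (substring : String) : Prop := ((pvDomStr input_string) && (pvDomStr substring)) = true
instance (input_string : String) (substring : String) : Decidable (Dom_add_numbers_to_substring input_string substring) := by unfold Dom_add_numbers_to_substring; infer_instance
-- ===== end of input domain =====

-- B rebuilds the string from input_string.split(substring) in one interleave pass instead of A's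
-- incremental find/slice loop; return values agree for every non-empty substring.

-- ===== PORT A =====
-- the while loop; fuel makes it total — with substring ≠ "" (Pre_) each iteration advances
-- index by at least 1, so fuel = len(input_string) is never exhausted inside Pre_
def addNumGo (s sub : List Char) : Nat → Int → Nat → List (List Char) → List (List Char)
  | 0, _, index, result => result ++ [PySem.List.slice s (some (index : Int)) none]
  | fuel + 1, count, index, result =>
    if index < s.length then
      let next_index := PySem.Chars.findFrom s sub (index : Int) none
      if next_index = -1 then
        result ++ [PySem.List.slice s (some (index : Int)) none]
      else
        addNumGo s sub fuel (count + 1) (next_index.toNat + sub.length)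
          (result ++ [PySem.List.slice s (some (index : Int)) (some next_index)]
                  ++ [sub ++ PySem.Int.toChars count ++ [' ']])
    else
      result ++ [PySem.List.slice s (some (index : Int)) none]

def add_numbers_to_substring (input_string : String) (substring : String) : String :=
  String.ofList (addNumGo input_string.toList substring.toList input_string.toList.length 1 0 []).flatten

-- ===== PORT B =====
def add_numbers_to_substring_alt (input_string : String) (substring : String) : String :=
  match PySem.Chars.split? input_string.toList substring.toList with
  | none => ""   -- str.split raises ValueError on an empty separator; excluded by Pre_
  | some parts =>
    -- pieces = [f"{substring}{i} {part}" for i, part in enumerate(parts[1:], 1)]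
    let pieces := (PySem.List.enumerate (PySem.List.slice parts (some 1)) 1).map
      (fun ip => substring.toList ++ PySem.Int.toChars ip.1 ++ [' '] ++ ip.2)
    -- parts[0] always exists: split never returns an empty list (headD is exact here)
    String.ofList (parts.headD [] ++ pieces.flatten)

-- ===== PRECONDITION & SPEC =====
-- Pre_ excludes only substring = "": there A loops forever on every non-empty input_string
-- (and B's split raises ValueError), so only the single input ("", "") on which A still
-- returns "" is excluded while B raises.
def Pre_add_numbers_to_substring (input_string : String) (substring : String) : Prop :=
  substring ≠ ""
instance (input_string : String) (substring : String) : Decidable (Pre_add_numbers_to_substring input_string substring) := by unfold Pre_add_numbers_to_substring; infer_instance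

def pvWitness_add_numbers_to_substring : String × String := ("abcab c", "ab")

def Spec_add_numbers_to_substring (input_string : String) (substring : String) (out : String) : Prop := out = add_numbers_to_substring_alt input_string substring
instance (input_string : String) (substring : String) (out : String) : Decidable (Spec_add_numbers_to_substring input_string substring out) := by unfold Spec_add_numbers_to_substring; infer_instance

-- ===== CLAIM (what is proved, stated in full; the proofs are below) =====
def Claim_equal_add_numbers_to_substring : Prop := ∀ (input_string : String) (substring : String), Dom_add_numbers_to_substring input_string substring → Pre_add_numbers_to_substring input_string substring → Spec_add_numbers_to_substring input_string substring (add_numbers_to_substring input_string substring)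

-- ===== LEMMAS AND PROOFS =====

-- the numbered separators B inserts between the remaining parts, starting at counter c
def interTail (sub : List Char) : Int → List (List Char) → List Char
  | _, [] => []
  | c, p :: ps => (sub ++ PySem.Int.toChars c ++ [' '] ++ p) ++ interTail sub (c + 1) ps

lemma interTail_eq (sub : List Char) :
    ∀ (ps : List (List Char)) (c : Int),
      ((PySem.List.enumerate ps c).map
        (fun ip => sub ++ PySem.Int.toChars ip.1 ++ [' '] ++ ip.2)).flatten
        = interTail sub c ps := by
  intro ps
  induction ps with
  | nil => intro c; simp [PySem.List.enumerate_nil, interTail]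
  | cons p ps ih =>
    intro c
    rw [PySem.List.enumerate_cons, List.map_cons, List.flatten_cons, ih, interTail]

-- find points at m iff sub starts at m and at no earlier index
lemma find_eq_of (s sub : List Char) (m : Nat)
    (h1 : sub <+: s.drop m) (h2 : ∀ i < m, ¬ sub <+: s.drop i) :
    PySem.Chars.find s sub = (m : Int) := by
  have hinf : sub <:+: s := by
    obtain ⟨r, hr⟩ := h1
    exact ⟨s.take m, r, by rw [List.append_assoc, hr, List.take_append_drop]⟩
  have hpos : 0 ≤ PySem.Chars.find s sub := (PySem.Chars.find_nonneg_iff s sub).mpr hinf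
  obtain ⟨hpre, hmin⟩ := PySem.Chars.find_spec hpos
  rcases lt_trichotomy (PySem.Chars.find s sub).toNat m with h | h | h
  · exact absurd hpre (h2 _ h)
  · omega
  · exact absurd h1 (hmin m h)

-- characterisation of splitOn.go (fuel sufficient): first occurrence split off, rest recursed
lemma go_spec (sub : List Char) (hsub : sub ≠ []) :
    ∀ (n : Nat) (l : List Char), l.length ≤ n →
    ∀ (fuel : Nat) (cur : List Char) (acc : List (List Char)), l.length < fuel →
      PySem.Chars.splitOn.go sub fuel l cur acc =
        acc.reverse ++
          (if PySem.Chars.find l sub = -1 then [cur.reverse ++ l]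
           else (cur.reverse ++ l.take (PySem.Chars.find l sub).toNat) ::
             PySem.Chars.splitOn (l.drop ((PySem.Chars.find l sub).toNat + sub.length)) sub) := by
  intro n
  induction n using Nat.strong_induction_on with
  | _ n ih =>
    intro l hl fuel cur acc hf
    match fuel with
    | 0 => omega
    | fuel + 1 =>
      match l with
      | [] =>
        have hfind : PySem.Chars.find [] sub = -1 := by
          rw [PySem.Chars.find_eq_neg_one_iff]
          simp [List.infix_nil, hsub]
        simp [PySem.Chars.splitOn.go, hfind]
      | c :: rest =>
        have hsublen : 1 ≤ sub.length := by
          cases sub with | nil => exact absurd rfl hsub | cons a t => simp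
        by_cases hp : sub.isPrefixOf (c :: rest)
        · -- separator starts right here: find = 0
          have hpre : sub <+: (c :: rest) := List.isPrefixOf_iff_prefix.mp hp
          have hfind : PySem.Chars.find (c :: rest) sub = (0 : Int) :=
            find_eq_of _ _ 0 (by simpa using hpre) (by omega)
          have hlt : ((c :: rest).drop sub.length).length < n := by
            simp only [List.length_drop, List.length_cons] at *
            omega
          have hrec1 := ih _ hlt ((c :: rest).drop sub.length) (le_refl _) fuel [] (cur.reverse :: acc)
            (by simp only [List.length_drop, List.length_cons] at *; omega)
          have hrec2 := ih _ hlt ((c :: rest).drop sub.length) (le_refl _)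
            (((c :: rest).drop sub.length).length + 1) [] [] (by omega)
          have hgo : PySem.Chars.splitOn.go sub (fuel + 1) (c :: rest) cur acc =
              PySem.Chars.splitOn.go sub fuel ((c :: rest).drop sub.length) [] (cur.reverse :: acc) := by
            simp [PySem.Chars.splitOn.go, hp]
          have hsp : PySem.Chars.splitOn ((c :: rest).drop sub.length) sub =
              PySem.Chars.splitOn.go sub (((c :: rest).drop sub.length).length + 1)
                ((c :: rest).drop sub.length) [] [] := rfl
          rw [hgo, hrec1, hfind]
          rw [if_neg (by omega : ¬ ((0 : Int) = -1))]
          rw [show ((0 : Int).toNat + sub.length) = sub.length by simp]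
          rw [hsp.trans hrec2]
          simp
        · -- separator does not start here: recurse on rest with c moved to cur
          have hnp : ¬ sub <+: (c :: rest) := fun h => hp (List.isPrefixOf_iff_prefix.mpr h)
          have hlt : rest.length < n := by simp at hl ⊢; omega
          have hrec := ih _ hlt rest (le_refl _) fuel (c :: cur) acc
            (by simp at hf ⊢; omega)
          have hgo : PySem.Chars.splitOn.go sub (fuel + 1) (c :: rest) cur acc =
              PySem.Chars.splitOn.go sub fuel rest (c :: cur) acc := by
            simp [PySem.Chars.splitOn.go, hp]
          rw [hgo, hrec]
          by_cases hr : PySem.Chars.find rest sub = -1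
          · have hfind : PySem.Chars.find (c :: rest) sub = -1 := by
              rw [PySem.Chars.find_eq_neg_one_iff] at hr ⊢
              intro h
              rcases List.infix_cons_iff.mp h with h | h
              · exact hnp h
              · exact hr h
            simp [hr, hfind]
          · have hr0 : 0 ≤ PySem.Chars.find rest sub := by
              have := PySem.Chars.neg_one_le_find rest sub; omega
            obtain ⟨hpre, hmin⟩ := PySem.Chars.find_spec hr0
            set m : Nat := (PySem.Chars.find rest sub).toNat with hm
            have hfind : PySem.Chars.find (c :: rest) sub = ((m + 1 : Nat) : Int) := by
              apply find_eq_of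
              · simpa using hpre
              · intro i hi
                match i with
                | 0 => simpa using hnp
                | i + 1 => simpa using hmin i (by omega)
            rw [if_neg hr, hfind]
            rw [if_neg (by omega : ¬ (((m + 1 : Nat) : Int) = -1))]
            have htn : ((m + 1 : Nat) : Int).toNat = m + 1 := by omega
            rw [htn]
            have h1 : List.take (m + 1) (c :: rest) = c :: List.take m rest := rfl
            have h2 : List.drop (m + 1 + sub.length) (c :: rest) = List.drop (m + sub.length) rest := by
              rw [show m + 1 + sub.length = (m + sub.length) + 1 by omega]
              rfl
            rw [h1, h2]
            simp
  
-- splitOn with a non-empty separator: first occurrence split off, remainder recursed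
lemma splitOn_eq (l sub : List Char) (hsub : sub ≠ []) :
    PySem.Chars.splitOn l sub =
      (if PySem.Chars.find l sub = -1 then [l]
       else l.take (PySem.Chars.find l sub).toNat ::
         PySem.Chars.splitOn (l.drop ((PySem.Chars.find l sub).toNat + sub.length)) sub) := by
  have := go_spec sub hsub l.length l (le_refl _) (l.length + 1) [] [] (by omega)
  simpa [PySem.Chars.splitOn] using this

lemma splitOn_ne_nil (l sub : List Char) (hsub : sub ≠ []) :
    PySem.Chars.splitOn l sub ≠ [] := by
  rw [splitOn_eq l sub hsub]
  split <;> simp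

-- loop invariant: A's loop from index with counter c produces B's interleave of the split of s[index:]
lemma addNumGo_spec (s sub : List Char) (hsub : sub ≠ []) :
    ∀ (fuel index : Nat) (c : Int) (result : List (List Char)),
      index ≤ s.length → s.length - index ≤ fuel →
      (addNumGo s sub fuel c index result).flatten =
        result.flatten ++ (PySem.Chars.splitOn (s.drop index) sub).headD []
          ++ interTail sub c ((PySem.Chars.splitOn (s.drop index) sub).drop 1) := by
  intro fuel
  induction fuel with
  | zero =>
    intro index c result hle hf
    have hix : index = s.length := by omega
    have hdrop : s.drop index = [] := by simp [hix]
    have hfind : PySem.Chars.find ([] : List Char) sub = -1 := by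
      rw [PySem.Chars.find_eq_neg_one_iff]; simp [List.infix_nil, hsub]
    rw [addNumGo, PySem.List.slice_from s (by omega : (0:Int) ≤ (index : Int))]
    simp [hdrop, splitOn_eq _ _ hsub, hfind, interTail]
  | succ fuel ih =>
    intro index c result hle hf
    by_cases hidx : index < s.length
    · rw [addNumGo]
      simp only [if_pos hidx]
      rw [PySem.Chars.findFrom_natCast s sub index hle]
      by_cases hn : PySem.Chars.find (s.drop index) sub = -1
      · rw [if_pos hn]
        rw [PySem.List.slice_from s (by omega : (0:Int) ≤ (index : Int))]
        simp [splitOn_eq _ _ hsub, hn, interTail]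
      · have h0 : 0 ≤ PySem.Chars.find (s.drop index) sub := by
          have := PySem.Chars.neg_one_le_find (s.drop index) sub; omega
        set m : Nat := (PySem.Chars.find (s.drop index) sub).toNat with hm
        have hmv : PySem.Chars.find (s.drop index) sub = (m : Int) := by omega
        obtain ⟨hpre, _⟩ := PySem.Chars.find_spec h0
        have hsub1 : 1 ≤ sub.length := by
          cases sub with | nil => exact absurd rfl hsub | cons a t => simp
        have hlen : m + sub.length ≤ s.length - index := by
          have := hpre.length_le
          simp only [List.length_drop] at this
          omega
        rw [if_neg hn]
        have hni : ¬ ((index : Int) + PySem.Chars.find (s.drop index) sub = -1) := by omega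
        rw [if_neg hni]
        have htoNat : ((index : Int) + PySem.Chars.find (s.drop index) sub).toNat = index + m := by
          omega
        have hslice : PySem.List.slice s (some (index : Int))
            (some ((index : Int) + PySem.Chars.find (s.drop index) sub)) =
            (s.drop index).take m := by
          have : (index : Int) + PySem.Chars.find (s.drop index) sub = ((index + m : Nat) : Int) := by
            omega
          rw [this, PySem.List.slice_natCast s index (index + m)]
          congr 1
          omega
        rw [htoNat, hslice]
        have hA : index + m + sub.length ≤ s.length := by omega
        have hB : s.length - (index + m + sub.length) ≤ fuel := by omega
        rw [ih (index + m + sub.length) (c + 1) _ hA hB]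
        have hdd : s.drop (index + m + sub.length) = (s.drop index).drop (m + sub.length) := by
          rw [List.drop_drop]; congr 1; omega
        rw [splitOn_eq (s.drop index) sub hsub, if_neg hn, hmv]
        have htm : ((m : Nat) : Int).toNat = m := by omega
        rw [htm, hdd]
        obtain ⟨q, QS, hq⟩ : ∃ q QS, PySem.Chars.splitOn ((s.drop index).drop (m + sub.length)) sub = q :: QS := by
          cases h : PySem.Chars.splitOn ((s.drop index).drop (m + sub.length)) sub with
          | nil => exact absurd h (splitOn_ne_nil _ _ hsub)
          | cons q QS => exact ⟨q, QS, rfl⟩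
        rw [hq]
        simp [interTail]
    · have hix : index = s.length := by omega
      have hdrop : s.drop index = [] := by simp [hix]
      have hfind : PySem.Chars.find ([] : List Char) sub = -1 := by
        rw [PySem.Chars.find_eq_neg_one_iff]; simp [List.infix_nil, hsub]
      rw [addNumGo]
      simp only [if_neg hidx]
      rw [PySem.List.slice_from s (by omega : (0:Int) ≤ (index : Int))]
      simp [hdrop, splitOn_eq _ _ hsub, hfind, interTail]

-- ===== VERDICT (by name: the statement is the Claim_ definition above) =====
theorem add_numbers_to_substring_spec : Claim_equal_add_numbers_to_substring := by
  intro input_string substring _ hpre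
  unfold Spec_add_numbers_to_substring
  have hsub : substring.toList ≠ [] := by
    intro h
    exact hpre (String.toList_eq_nil_iff.mp h)
  unfold add_numbers_to_substring add_numbers_to_substring_alt
  have hsplit : PySem.Chars.split? input_string.toList substring.toList =
      some (PySem.Chars.splitOn input_string.toList substring.toList) := by
    simp [PySem.Chars.split?, hsub]
  rw [hsplit]
  have hmain := addNumGo_spec input_string.toList substring.toList hsub
    input_string.toList.length 0 1 [] (by omega) (by omega)
  simp only [List.drop_zero, List.flatten_nil, List.nil_append] at hmain
  rw [hmain]
  have hslice : PySem.List.slice (PySem.Chars.splitOn input_string.toList substring.toList) (some 1) =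
      (PySem.Chars.splitOn input_string.toList substring.toList).drop 1 := by
    rw [PySem.List.slice_from _ (by omega : (0:Int) ≤ 1)]
    rfl
  simp only [hslice, interTail_eq]
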